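-- pv_equiv track=rewrite | github.com/seongikjin227-jpg/migration-main | migration-main/app/features/rag/tobe_rag_indexer.py | _extract_clause_block
-- ===== SOURCE A (Python) =====
-- def _extract_clause_block(sql_text: str, clause_name: str) -> str:
--     upper_text = f" {sql_text or ''} "
--     clause = clause_name.upper()
--     boundaries = {
--         "SELECT": [" FROM "],
--         "FROM": [" WHERE ", " GROUP BY ", " ORDER BY ", " HAVING ", " UNION ", " FETCH FIRST "],
--         "WHERE": [" GROUP BY ", " ORDER BY ", " HAVING ", " UNION ", " FETCH FIRST "],
--         "ORDER BY": [" FETCH FIRST "],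
--     }
--     marker = f" {clause} "
--     start = upper_text.upper().find(marker)
--     if start < 0:
--         return ""
--     start += 1
--     end = len(upper_text) - 1
--     for boundary in boundaries.get(clause, []):
--         pos = upper_text.upper().find(boundary, start + len(marker))
--         if pos >= 0:
--             end = min(end, pos)
--     return upper_text[start:end].strip()
-- ===== SOURCE B (Python) =====
-- def _extract_clause_block(sql_text: str, clause_name: str) -> str:
--     text = f" {sql_text or ''} "
--     upper = text.upper()
--     clause = clause_name.upper()
--     boundaries = {
--         "SELECT": [" FROM "],
--         "FROM": [" WHERE ", " GROUP BY ", " ORDER BY ", " HAVING ", " UNION ", " FETCH FIRST "],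
--         "WHERE": [" GROUP BY ", " ORDER BY ", " HAVING ", " UNION ", " FETCH FIRST "],
--         "ORDER BY": [" FETCH FIRST "],
--     }.get(clause, [])
--     marker = f" {clause} "
--     start = upper.find(marker)
--     if start < 0:
--         return ""
--     start += 1
--     end = len(text) - 1
--     i = start + len(marker)
--     while i < len(text):
--         if any(upper.startswith(b, i) for b in boundaries):
--             end = i
--             break
--         i += 1
--     return text[start:end].strip()
-- ===== Notes on version B (the rewrite author's own statement) =====
-- stated objective: alternative
-- what changed: A finds each boundary separately with str.find and takes the minimum position; B uppercases the padded text once and does a single left-to-right scan that stops at the first position where any boundary matches (startswith), defaulting to len(text)-1.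
import Mathlib
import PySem

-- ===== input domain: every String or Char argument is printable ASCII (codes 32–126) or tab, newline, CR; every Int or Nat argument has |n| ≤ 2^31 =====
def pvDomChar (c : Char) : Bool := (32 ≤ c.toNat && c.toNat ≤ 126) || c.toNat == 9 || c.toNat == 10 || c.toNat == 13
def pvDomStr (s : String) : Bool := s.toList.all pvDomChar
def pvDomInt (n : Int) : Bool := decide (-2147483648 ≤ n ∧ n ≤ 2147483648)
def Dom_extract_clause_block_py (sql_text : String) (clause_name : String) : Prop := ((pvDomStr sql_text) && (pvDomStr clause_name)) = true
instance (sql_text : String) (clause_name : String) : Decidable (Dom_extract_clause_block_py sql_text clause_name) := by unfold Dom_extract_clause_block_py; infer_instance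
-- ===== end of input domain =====

-- B replaces A's per-boundary find+min phase by a single left-to-right scan that stops at the
-- first position where any boundary matches (objective: alternative; equal return values).

-- ===== PORT A =====
-- the boundary table: a dict literal appearing verbatim in both Pythons (shared data)
def sqlBoundaries : PySem.Dict (List Char) (List (List Char)) :=
  ⟨[("SELECT".toList, [" FROM ".toList]),
    ("FROM".toList, [" WHERE ".toList, " GROUP BY ".toList, " ORDER BY ".toList,
                     " HAVING ".toList, " UNION ".toList, " FETCH FIRST ".toList]),
    ("WHERE".toList, [" GROUP BY ".toList, " ORDER BY ".toList, " HAVING ".toList,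
                      " UNION ".toList, " FETCH FIRST ".toList]),
    ("ORDER BY".toList, [" FETCH FIRST ".toList])]⟩

def extract_clause_block_py (sql_text : String) (clause_name : String) : String :=
  -- f" {sql_text or ''} " : for sql_text = "" (falsy) the result is the same padding
  let upper_text : List Char := (' ' :: sql_text.toList) ++ [' ']
  let clause : List Char := PySem.Chars.upper clause_name.toList
  let marker : List Char := (' ' :: clause) ++ [' ']
  let start : Int := PySem.Chars.find (PySem.Chars.upper upper_text) marker
  if start < 0 then ""
  else
    let start : Int := start + 1
    let endv : Int := (sqlBoundaries.getD clause []).foldl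
      (fun endv boundary =>
        let pos := PySem.Chars.findFrom (PySem.Chars.upper upper_text) boundary
          (start + (marker.length : Int)) none
        if 0 ≤ pos then min endv pos else endv)
      ((upper_text.length : Int) - 1)
    String.ofList (PySem.Chars.strip (PySem.List.slice upper_text (some start) (some endv)))

-- ===== PORT B =====
-- the while loop of Source B: first i in [i, tlen) where some boundary matches, else tlen - 1
def altScan (up : List Char) (bs : List (List Char)) (tlen i : Nat) : Int :=
  if i < tlen then
    if bs.any (fun b => PySem.Chars.startswith (up.drop i) b) then (i : Int)
    else altScan up bs tlen (i + 1)
  else (tlen : Int) - 1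
termination_by tlen - i

def extract_clause_block_py_alt (sql_text : String) (clause_name : String) : String :=
  let text : List Char := (' ' :: sql_text.toList) ++ [' ']
  let up : List Char := PySem.Chars.upper text
  let clause : List Char := PySem.Chars.upper clause_name.toList
  let bs : List (List Char) := sqlBoundaries.getD clause []
  let marker : List Char := (' ' :: clause) ++ [' ']
  let start : Int := PySem.Chars.find up marker
  if start < 0 then ""
  else
    -- here start ≥ 0, so Python's loop start "start + 1 + len(marker)" is this Nat
    let endv : Int := altScan up bs text.length (start.toNat + 1 + marker.length)
    String.ofList (PySem.Chars.strip (PySem.List.slice text (some (start + 1)) (some endv)))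

-- ===== PRECONDITION & SPEC =====
def Spec_extract_clause_block_py (sql_text : String) (clause_name : String) (out : String) : Prop := out = extract_clause_block_py_alt sql_text clause_name
instance (sql_text : String) (clause_name : String) (out : String) : Decidable (Spec_extract_clause_block_py sql_text clause_name out) := by unfold Spec_extract_clause_block_py; infer_instance

-- ===== CLAIM (what is proved, stated in full; the proofs are below) =====
def Claim_equal_extract_clause_block_py : Prop := ∀ (sql_text : String) (clause_name : String), Dom_extract_clause_block_py sql_text clause_name → Spec_extract_clause_block_py sql_text clause_name (extract_clause_block_py sql_text clause_name)

-- ===== LEMMAS AND PROOFS =====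

-- findFrom past the end of the string is -1 (Python: slice-clamped start, empty haystack)
lemma findFrom_of_gt_length (up b : List Char) (k : Nat) (h : up.length < k) :
    PySem.Chars.findFrom up b (k : Int) none = -1 := by
  simp only [PySem.Chars.findFrom]
  split_ifs with h1 h2 h3 <;> try rfl
  all_goals omega

-- every boundary list stored in the table consists of nonempty strings
lemma boundaries_ne_nil (c b : List Char) (hb : b ∈ PySem.Dict.getD sqlBoundaries c []) :
    b ≠ [] := by
  cases h1 : ("SELECT".toList == c) <;> cases h2 : ("FROM".toList == c) <;>
    cases h3 : ("WHERE".toList == c) <;> cases h4 : ("ORDER BY".toList == c) <;>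
    simp only [sqlBoundaries, PySem.Dict.getD, PySem.Dict.get?, List.find?, h1, h2, h3, h4,
      Option.map_some, Option.map_none, Option.getD_some, Option.getD_none] at hb <;>
    (rintro rfl; simp_all)

-- A's fold: if no boundary occurs at or after k, the accumulator is unchanged
lemma fold_id (up : List Char) (k : Nat) (bs : List (List Char)) (e : Int)
    (h : ∀ b ∈ bs, PySem.Chars.findFrom up b (k : Int) none = -1) :
    bs.foldl (fun endv b =>
        if 0 ≤ PySem.Chars.findFrom up b (k : Int) none
        then min endv (PySem.Chars.findFrom up b (k : Int) none) else endv) e = e := by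
  induction bs generalizing e with
  | nil => rfl
  | cons b bs ih =>
      have hb := h b (by simp)
      simp only [List.foldl_cons, hb]
      rw [if_neg (by omega)]
      exact ih e (fun b' hb' => h b' (by simp [hb']))

-- A's fold never increases the accumulator
lemma fold_le_init (up : List Char) (k : Nat) (bs : List (List Char)) (e : Int) :
    bs.foldl (fun endv b =>
        if 0 ≤ PySem.Chars.findFrom up b (k : Int) none
        then min endv (PySem.Chars.findFrom up b (k : Int) none) else endv) e ≤ e := by
  induction bs generalizing e with
  | nil => exact le_rfl
  | cons b bs ih =>
      simp only [List.foldl_cons]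
      refine le_trans (ih _) ?_
      dsimp only
      split_ifs with h
      · exact min_le_left _ _
      · exact le_rfl

-- A's fold is at most each successful find
lemma fold_le (up : List Char) (k : Nat) (bs : List (List Char)) (e : Int)
    (b : List Char) (hb : b ∈ bs) (hp : 0 ≤ PySem.Chars.findFrom up b (k : Int) none) :
    bs.foldl (fun endv b =>
        if 0 ≤ PySem.Chars.findFrom up b (k : Int) none
        then min endv (PySem.Chars.findFrom up b (k : Int) none) else endv) e
      ≤ PySem.Chars.findFrom up b (k : Int) none := by
  induction bs generalizing e with
  | nil => cases hb
  | cons b' bs ih =>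
      rcases List.mem_cons.mp hb with rfl | hb'
      · simp only [List.foldl_cons, if_pos hp]
        exact le_trans (fold_le_init up k bs _) (min_le_right _ _)
      · simp only [List.foldl_cons]
        exact ih _ hb'

-- A's fold returns the initial value or one of the successful finds
lemma fold_cases (up : List Char) (k : Nat) (bs : List (List Char)) (e : Int) :
    bs.foldl (fun endv b =>
        if 0 ≤ PySem.Chars.findFrom up b (k : Int) none
        then min endv (PySem.Chars.findFrom up b (k : Int) none) else endv) e = e ∨
    ∃ b ∈ bs, bs.foldl (fun endv b =>
        if 0 ≤ PySem.Chars.findFrom up b (k : Int) none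
        then min endv (PySem.Chars.findFrom up b (k : Int) none) else endv) e
        = PySem.Chars.findFrom up b (k : Int) none ∧
      0 ≤ PySem.Chars.findFrom up b (k : Int) none := by
  induction bs generalizing e with
  | nil => exact Or.inl rfl
  | cons b bs ih =>
      rcases ih (if 0 ≤ PySem.Chars.findFrom up b (k : Int) none
        then min e (PySem.Chars.findFrom up b (k : Int) none) else e) with h | ⟨b', hb', h, hp⟩
      · simp only [List.foldl_cons, h]
        split_ifs with hp
        · rcases min_cases e (PySem.Chars.findFrom up b (k : Int) none) with ⟨h', _⟩ | ⟨h', _⟩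
          · exact Or.inl h'
          · exact Or.inr ⟨b, by simp, h', hp⟩
        · exact Or.inl rfl
      · exact Or.inr ⟨b', by simp [hb'], h, hp⟩

-- B's scan when no boundary matches anywhere in [k, L)
lemma altScan_none (up : List Char) (bs : List (List Char)) (L k : Nat)
    (h : ∀ i, k ≤ i → i < L →
      (bs.any fun b => PySem.Chars.startswith (up.drop i) b) = false) :
    altScan up bs L k = (L : Int) - 1 := by
  unfold altScan
  split_ifs with h1 h2
  · exact absurd (h k le_rfl h1) (by simp [h2])
  · exact altScan_none up bs L (k + 1) (fun i hi hiL => h i (by omega) hiL)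
  · rfl
termination_by L - k

-- B's scan returns the first matching position
lemma altScan_found (up : List Char) (bs : List (List Char)) (L k j : Nat)
    (hkj : k ≤ j) (hjL : j < L)
    (hj : (bs.any fun b => PySem.Chars.startswith (up.drop j) b) = true)
    (hmin : ∀ i, k ≤ i → i < j →
      (bs.any fun b => PySem.Chars.startswith (up.drop i) b) = false) :
    altScan up bs L k = (j : Int) := by
  unfold altScan
  rw [if_pos (by omega)]
  by_cases hk : (bs.any fun b => PySem.Chars.startswith (up.drop k) b) = true
  · have : k = j := by
      by_contra hne
      exact absurd (hmin k le_rfl (by omega)) (by simp [hk])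
    rw [if_pos hk, this]
  · rw [if_neg hk]
    have hkj' : k ≠ j := by rintro rfl; exact hk hj
    exact altScan_found up bs L (k + 1) j (by omega) hjL hj
      (fun i hi hij => hmin i (by omega) hij)
termination_by L - k

-- a nonempty prefix of a drop forces the index below the length
lemma lt_length_of_prefix_drop (up b : List Char) (m : Nat)
    (hb : b ≠ []) (h : b <+: up.drop m) : m < up.length := by
  by_contra hm
  rw [List.drop_eq_nil_iff.mpr (by omega)] at h
  exact hb (List.prefix_nil.mp h)

-- the key equivalence: A's min-over-finds equals B's first-match scan
lemma fold_eq_scan (up : List Char) (bs : List (List Char))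
    (hbs : ∀ b ∈ bs, b ≠ []) (k : Nat) :
    bs.foldl (fun endv b =>
        if 0 ≤ PySem.Chars.findFrom up b (k : Int) none
        then min endv (PySem.Chars.findFrom up b (k : Int) none) else endv)
      ((up.length : Int) - 1)
      = altScan up bs up.length k := by
  by_cases hQ : ∃ i, k ≤ i ∧ i < up.length ∧
      (bs.any fun b => PySem.Chars.startswith (up.drop i) b) = true
  · -- some position matches: both sides are the least such position
    have j := Nat.find hQ
    obtain ⟨hkj, hjL, hj⟩ := Nat.find_spec hQ
    have hmin : ∀ i, k ≤ i → i < Nat.find hQ →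
        (bs.any fun b => PySem.Chars.startswith (up.drop i) b) = false := by
      intro i hi hij
      have := Nat.find_min hQ hij
      by_contra hcon
      exact this ⟨hi, by omega, by simpa using hcon⟩
    rw [altScan_found up bs up.length k (Nat.find hQ) hkj hjL hj hmin]
    have hkL : k ≤ up.length := by omega
    -- upper bound: some boundary's find is ≤ j
    obtain ⟨b₁, hb₁, hsw₁⟩ := List.any_eq_true.mp hj
    have hpre₁ : b₁ <+: up.drop (Nat.find hQ) := (PySem.Chars.startswith_iff _ _).mp hsw₁
    have hinfix₁ : b₁ <:+: List.drop k up := by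
      refine hpre₁.isInfix.trans ?_
      have : List.drop (Nat.find hQ - k) (List.drop k up) = List.drop (Nat.find hQ) up := by
        rw [List.drop_drop]; congr 1; omega
      rw [← this]
      exact (List.drop_suffix _ _).isInfix
    have hne₁ : PySem.Chars.findFrom up b₁ (k : Int) none ≠ -1 := by
      intro hcon
      exact absurd hinfix₁ ((PySem.Chars.findFrom_natCast_eq_neg_one_iff up b₁ k hkL).mp hcon)
    obtain ⟨hk₁, hpre₁', hmin₁⟩ := PySem.Chars.findFrom_natCast_spec up b₁ k hkL hne₁
    have hle₁ : PySem.Chars.findFrom up b₁ (k : Int) none ≤ (Nat.find hQ : Int) := by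
      by_contra hcon
      exact (hmin₁ (Nat.find hQ) hkj (by omega)) hpre₁
    have hF₁ := fold_le up k bs ((up.length : Int) - 1) b₁ hb₁ (by omega)
    -- lower bound: the fold's value is a matching position (or L-1), hence ≥ j
    have hge : (Nat.find hQ : Int) ≤ bs.foldl (fun endv b =>
        if 0 ≤ PySem.Chars.findFrom up b (k : Int) none
        then min endv (PySem.Chars.findFrom up b (k : Int) none) else endv)
        ((up.length : Int) - 1) := by
      rcases fold_cases up k bs ((up.length : Int) - 1) with h | ⟨b₂, hb₂, h, hp₂⟩
      · rw [h]; omega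
      · rw [h]
        have hne₂ : PySem.Chars.findFrom up b₂ (k : Int) none ≠ -1 := by omega
        obtain ⟨hk₂, hpre₂, _⟩ := PySem.Chars.findFrom_natCast_spec up b₂ k hkL hne₂
        have hlt₂ : (PySem.Chars.findFrom up b₂ (k : Int) none).toNat < up.length :=
          lt_length_of_prefix_drop up b₂ _ (hbs b₂ hb₂) hpre₂
        have hfind := Nat.find_min' hQ (m := (PySem.Chars.findFrom up b₂ (k : Int) none).toNat)
          ⟨by omega, hlt₂, List.any_eq_true.mpr ⟨b₂, hb₂,
            (PySem.Chars.startswith_iff _ _).mpr hpre₂⟩⟩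
        omega
    omega
  · -- no position matches: every find fails and both sides are L-1
    push_neg at hQ
    have hnone : ∀ i, k ≤ i → i < up.length →
        (bs.any fun b => PySem.Chars.startswith (up.drop i) b) = false := by
      intro i hi hiL
      by_contra hcon
      exact absurd (by simpa using hcon) (by simpa using hQ i hi hiL)
    rw [altScan_none up bs up.length k hnone]
    refine fold_id up k bs _ (fun b hb => ?_)
    by_cases hkL : k ≤ up.length
    · rw [PySem.Chars.findFrom_natCast_eq_neg_one_iff up b k hkL]
      intro hinf
      obtain ⟨j, hpre⟩ := (PySem.Chars.exists_prefix_drop_iff_isIn _ _).mpr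
        ((PySem.Chars.isIn_iff_infix _ _).mpr hinf)
      rw [List.drop_drop] at hpre
      have hlt : k + j < up.length := lt_length_of_prefix_drop up b _ (hbs b hb) hpre
      have hany : (bs.any fun b => PySem.Chars.startswith (List.drop (k + j) up) b) = true :=
        List.any_eq_true.mpr ⟨b, hb, (PySem.Chars.startswith_iff _ _).mpr hpre⟩
      rw [hnone (k + j) (by omega) hlt] at hany
      exact Bool.false_ne_true hany
    · exact findFrom_of_gt_length up b k (by omega)

-- ===== VERDICT (by name: the statement is the Claim_ definition above) =====
theorem extract_clause_block_py_spec : Claim_equal_extract_clause_block_py := by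
  intro s c _
  unfold Spec_extract_clause_block_py extract_clause_block_py extract_clause_block_py_alt
  dsimp only
  set text : List Char := (' ' :: s.toList) ++ [' '] with htext
  set clause : List Char := PySem.Chars.upper c.toList with hclause
  set marker : List Char := (' ' :: clause) ++ [' '] with hmarker
  set up : List Char := PySem.Chars.upper text with hup
  set start : Int := PySem.Chars.find up marker with hstart
  by_cases hs : start < 0
  · rw [if_pos hs, if_pos hs]
  · rw [if_neg hs, if_neg hs]
    have hlen : up.length = text.length := by simp [hup, PySem.Chars.upper]
    have hk : start + 1 + (marker.length : Int) = ((start.toNat + 1 + marker.length : Nat) : Int) := by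
      omega
    rw [hk]
    rw [show ((text.length : Int) - 1) = ((up.length : Int) - 1) by rw [hlen],
        show text.length = up.length from hlen.symm]
    rw [fold_eq_scan up (sqlBoundaries.getD clause []) (boundaries_ne_nil clause) _]
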